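-- pv_equiv track=rewrite | github.com/Ermal-Gashi/reddit-sentiment-platform | etl_pipline/bronze/fetch.py | _compute_root
-- ===== SOURCE A (Python) =====
-- from typing import List, Dict, Any, Tuple, Set
--
-- def _compute_root(parent_map: Dict[str, str], cid: str) -> str:
--     """Walk up parent_map until top-level (parent == ''), return the top-level comment id (or cid if already top-level)."""
--     seen = set()
--     cur = cid
--     while True:
--         if cur in seen:
--             return cid
--         seen.add(cur)
--         pid = parent_map.get(cur, "")
--         if not pid:
--             return cur
--         cur = pid
-- ===== SOURCE B (Python) =====
-- def _compute_root(parent_map, cid):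
--     """Floyd tortoise-and-hare: detect a parent cycle with two pointers of
--     different speeds (O(1) extra space) instead of a visited set; on a
--     terminating chain finish walking the slow pointer to the top-level id."""
--     slow = fast = cid
--     while True:
--         p = parent_map.get(fast, "")
--         if not p:
--             break
--         q = parent_map.get(p, "")
--         if not q:
--             break
--         fast = q
--         slow = parent_map.get(slow, "")
--         if slow == fast:
--             return cid  # cycle reachable from cid
--     while True:
--         p = parent_map.get(slow, "")
--         if not p:
--             return slow
--         slow = p
-- ===== Notes on version B (the rewrite author's own statement) =====
-- stated objective: alternative
-- what changed: Replaced the visited-set cycle guard by Floyd's tortoise-and-hare: a slow and a double-speed pointer walk the parent chain, a pointer meeting signals the cycle (return cid), and on a terminating chain the slow pointer is walked to the top-level id; no set is built.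
import Mathlib
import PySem

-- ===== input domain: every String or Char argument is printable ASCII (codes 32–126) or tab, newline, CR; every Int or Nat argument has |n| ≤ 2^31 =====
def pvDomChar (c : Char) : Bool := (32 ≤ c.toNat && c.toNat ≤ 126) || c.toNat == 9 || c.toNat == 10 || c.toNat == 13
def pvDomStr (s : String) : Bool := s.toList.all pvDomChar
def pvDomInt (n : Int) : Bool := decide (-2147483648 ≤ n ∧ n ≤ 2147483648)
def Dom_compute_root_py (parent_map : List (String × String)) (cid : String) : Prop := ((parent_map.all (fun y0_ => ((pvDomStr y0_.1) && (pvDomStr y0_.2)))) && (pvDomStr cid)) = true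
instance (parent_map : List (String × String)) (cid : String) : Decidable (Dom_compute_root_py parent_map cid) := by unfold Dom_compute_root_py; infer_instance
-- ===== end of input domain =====

-- B replaces A's visited-set cycle guard by Floyd's tortoise-and-hare two-pointer cycle detection (O(1) extra space).
-- Shared helper: parent_map.get(cur, "")
def pvStep (parent_map : List (String × String)) (cur : String) : String :=
  PySem.Dict.getD (PySem.Dict.mk parent_map) cur ""

-- ===== PORT A =====
-- A's 'while True' loop with a visited set 'seen'; the fuel argument only makes the
-- recursion total (the proof shows length+2 iterations always suffice).
def pvALoop (parent_map : List (String × String)) (cid : String) :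
    Nat → PySem.Set String → String → String
  | 0, _, _ => cid
  | fuel + 1, seen, cur =>
    if PySem.Set.contains seen cur then cid
    else
      let pid := pvStep parent_map cur
      if pid = "" then cur
      else pvALoop parent_map cid fuel (PySem.Set.add seen cur) pid

def compute_root_py (parent_map : List (String × String)) (cid : String) : String :=
  pvALoop parent_map cid (parent_map.length + 2) PySem.Set.empty cid

-- ===== PORT B =====
-- Source B's first 'while True' loop: tortoise (slow) and hare (fast); 'none' means the
-- pointers met (cycle), 'some slow' means the hare hit a top-level node.  Fuel only
-- makes the recursion total (the proof shows n^2+n+1 iterations always suffice).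
def pvFloydLoop (parent_map : List (String × String)) :
    Nat → String → String → Option String
  | 0, slow, _ => some slow
  | fuel + 1, slow, fast =>
    let p := pvStep parent_map fast
    if p = "" then some slow
    else
      let q := pvStep parent_map p
      if q = "" then some slow
      else
        let slow' := pvStep parent_map slow
        if slow' = q then none
        else pvFloydLoop parent_map fuel slow' q

-- Source B's second 'while True' loop: walk slow to the top-level node.
def pvTail (parent_map : List (String × String)) : Nat → String → String
  | 0, slow => slow
  | fuel + 1, slow =>
    let p := pvStep parent_map slow
    if p = "" then slow else pvTail parent_map fuel p

def compute_root_py_alt (parent_map : List (String × String)) (cid : String) : String :=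
  match pvFloydLoop parent_map (parent_map.length * parent_map.length + parent_map.length + 1) cid cid with
  | none => cid
  | some slow => pvTail parent_map (parent_map.length + 1) slow

-- ===== PRECONDITION & SPEC =====
def Spec_compute_root_py (parent_map : List (String × String)) (cid : String) (out : String) : Prop := out = compute_root_py_alt parent_map cid
instance (parent_map : List (String × String)) (cid : String) (out : String) : Decidable (Spec_compute_root_py parent_map cid out) := by unfold Spec_compute_root_py; infer_instance

-- ===== CLAIM (what is proved, stated in full; the proofs are below) =====
def Claim_equal_compute_root_py : Prop := ∀ (parent_map : List (String × String)) (cid : String), Dom_compute_root_py parent_map cid → Spec_compute_root_py parent_map cid (compute_root_py parent_map cid)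

-- ===== LEMMAS AND PROOFS =====

-- The abstract parent walk: pvWalk n = the node after n parent steps from cid.
def pvWalk (parent_map : List (String × String)) (cid : String) : Nat → String
  | 0 => cid
  | n + 1 => pvStep parent_map (pvWalk parent_map cid n)

lemma pvWalk_add (pm : List (String × String)) (cid : String) {i j : Nat}
    (h : pvWalk pm cid i = pvWalk pm cid j) (d : Nat) :
    pvWalk pm cid (i + d) = pvWalk pm cid (j + d) := by
  induction d with
  | zero => simpa using h
  | succ d ih => simpa [pvWalk, Nat.add_succ] using congrArg (pvStep pm) ih

-- Up to the first terminating index k, the walk is injective.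
lemma pvWalk_ne (pm : List (String × String)) (cid : String) {m k : Nat}
    (hne : ∀ t, m ≤ t → t < k → pvStep pm (pvWalk pm cid t) ≠ "")
    (hk : pvStep pm (pvWalk pm cid k) = "")
    {i j : Nat} (hmi : m ≤ i) (hij : i < j) (hjk : j ≤ k) :
    pvWalk pm cid i ≠ pvWalk pm cid j := by
  intro h
  have hd := pvWalk_add pm cid h (k - j)
  have hj' : j + (k - j) = k := by omega
  rw [hj'] at hd
  have : pvStep pm (pvWalk pm cid (i + (k - j))) = "" := by rw [hd]; exact hk
  exact hne (i + (k - j)) (by omega) (by omega) this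

-- A repetition walk i = walk (i+p) makes the walk p-periodic from index i on.
lemma pvWalk_period (pm : List (String × String)) (cid : String) {i p : Nat}
    (h : pvWalk pm cid i = pvWalk pm cid (i + p)) :
    ∀ c m, i ≤ m → pvWalk pm cid (m + c * p) = pvWalk pm cid m := by
  intro c
  induction c with
  | zero => intro m _; simp
  | succ c ih =>
    intro m hm
    have h1 := pvWalk_add pm cid h (m - i + c * p)
    have e1 : i + (m - i + c * p) = m + c * p := by omega
    have e2 : i + p + (m - i + c * p) = m + (c + 1) * p := by ring_nf; omega
    rw [e1, e2] at h1
    exact h1.symm.trans (ih m hm)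

-- The tail loop on a terminating chain returns the terminal node.
lemma pvTail_term (pm : List (String × String)) (cid : String) {k : Nat} :
    ∀ n m, m ≤ k → k < m + n → pvStep pm (pvWalk pm cid k) = "" →
    (∀ t, m ≤ t → t < k → pvStep pm (pvWalk pm cid t) ≠ "") →
    pvTail pm n (pvWalk pm cid m) = pvWalk pm cid k := by
  intro n
  induction n with
  | zero => intro m hmk hk _ _; omega
  | succ n ih =>
    intro m hmk hk hterm hne
    by_cases hs : pvStep pm (pvWalk pm cid m) = ""
    · have hmk' : m = k := by
        by_contra hne'
        exact hne m le_rfl (by omega) hs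
      subst hmk'
      simp [pvTail, hs]
    · have hmlt : m < k := by
        rcases Nat.lt_or_ge m k with h | h
        · exact h
        · have : m = k := by omega
          exact absurd (this ▸ hterm) hs
      have : pvTail pm (n + 1) (pvWalk pm cid m) = pvTail pm n (pvWalk pm cid (m + 1)) := by
        simp [pvTail, hs, pvWalk]
      rw [this]
      exact ih (m + 1) (by omega) (by omega) hterm (fun t ht1 ht2 => hne t (by omega) ht2)

-- The Floyd loop on a terminating chain breaks at some slow index ≤ k.
lemma pvFloydLoop_term (pm : List (String × String)) (cid : String) {k : Nat}
    (hterm : pvStep pm (pvWalk pm cid k) = "")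
    (hne : ∀ t, t < k → pvStep pm (pvWalk pm cid t) ≠ "") :
    ∀ fuel t, 2 * t ≤ k → k ≤ 2 * t + 2 * fuel →
    ∃ t0, t0 ≤ k ∧ pvFloydLoop pm fuel (pvWalk pm cid t) (pvWalk pm cid (2 * t)) = some (pvWalk pm cid t0) := by
  intro fuel
  induction fuel with
  | zero =>
    intro t h1 h2
    exact ⟨t, by omega, rfl⟩
  | succ fuel ih =>
    intro t h1 h2
    by_cases hp : pvStep pm (pvWalk pm cid (2 * t)) = ""
    · exact ⟨t, by omega, by simp [pvFloydLoop, hp]⟩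
    · have h2t : 2 * t < k := by
        rcases Nat.lt_or_ge (2 * t) k with h | h
        · exact h
        · have : 2 * t = k := by omega
          exact absurd (this ▸ hterm) hp
      have hp' : pvStep pm (pvWalk pm cid (2 * t)) = pvWalk pm cid (2 * t + 1) := rfl
      by_cases hq : pvStep pm (pvWalk pm cid (2 * t + 1)) = ""
      · exact ⟨t, by omega, by simp [pvFloydLoop, hp', hq]⟩
      · have h2t1 : 2 * t + 1 < k := by
          rcases Nat.lt_or_ge (2 * t + 1) k with h | h
          · exact h
          · have : 2 * t + 1 = k := by omega
            exact absurd (this ▸ hterm) hq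
        have hq' : pvStep pm (pvWalk pm cid (2 * t + 1)) = pvWalk pm cid (2 * t + 2) := rfl
        have hp2 : pvWalk pm cid (2 * t + 1) ≠ "" := hp' ▸ hp
        have hq2 : pvWalk pm cid (2 * t + 2) ≠ "" := hq' ▸ hq
        have hslow : pvStep pm (pvWalk pm cid t) = pvWalk pm cid (t + 1) := rfl
        have hnemeet : pvWalk pm cid (t + 1) ≠ pvWalk pm cid (2 * t + 2) :=
          pvWalk_ne pm cid (fun t' _ ht' => hne t' ht') hterm (Nat.zero_le _) (by omega) (by omega)
        have hstep : pvFloydLoop pm (fuel + 1) (pvWalk pm cid t) (pvWalk pm cid (2 * t))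
            = pvFloydLoop pm fuel (pvWalk pm cid (t + 1)) (pvWalk pm cid (2 * (t + 1))) := by
          have e : 2 * (t + 1) = 2 * t + 2 := by omega
          simp [pvFloydLoop, hp', hq', hp2, hq2, hslow, hnemeet, e]
        rw [hstep]
        exact ih (t + 1) (by omega) (by omega)

-- The Floyd loop detects a cycle: if the pointers would meet at index T, it returns none.
lemma pvFloydLoop_cyc (pm : List (String × String)) (cid : String) {T : Nat}
    (hT : pvWalk pm cid T = pvWalk pm cid (2 * T))
    (hall : ∀ s, pvStep pm (pvWalk pm cid s) ≠ "") :
    ∀ fuel t, t < T → T ≤ t + fuel →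
    pvFloydLoop pm fuel (pvWalk pm cid t) (pvWalk pm cid (2 * t)) = none := by
  intro fuel
  induction fuel with
  | zero => intro t h1 h2; omega
  | succ fuel ih =>
    intro t h1 h2
    have hp : pvStep pm (pvWalk pm cid (2 * t)) ≠ "" := hall _
    have hp' : pvStep pm (pvWalk pm cid (2 * t)) = pvWalk pm cid (2 * t + 1) := rfl
    have hq : pvStep pm (pvWalk pm cid (2 * t + 1)) ≠ "" := hall _
    have hq' : pvStep pm (pvWalk pm cid (2 * t + 1)) = pvWalk pm cid (2 * t + 2) := rfl
    have hp2 : pvWalk pm cid (2 * t + 1) ≠ "" := hp' ▸ hp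
    have hq2 : pvWalk pm cid (2 * t + 2) ≠ "" := hq' ▸ hq
    have hslow : pvStep pm (pvWalk pm cid t) = pvWalk pm cid (t + 1) := rfl
    by_cases hmeet : pvWalk pm cid (t + 1) = pvWalk pm cid (2 * t + 2)
    · simp [pvFloydLoop, hp', hq', hp2, hq2, hslow, hmeet]
    · have htT : t + 1 < T := by
        rcases Nat.lt_or_ge (t + 1) T with h | h
        · exact h
        · have : t + 1 = T := by omega
          subst this
          exact absurd (by simpa [Nat.mul_add] using hT) hmeet
      have hstep : pvFloydLoop pm (fuel + 1) (pvWalk pm cid t) (pvWalk pm cid (2 * t))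
          = pvFloydLoop pm fuel (pvWalk pm cid (t + 1)) (pvWalk pm cid (2 * (t + 1))) := by
        have e : 2 * (t + 1) = 2 * t + 2 := by omega
        simp [pvFloydLoop, hp', hq', hp2, hq2, hslow, hmeet, e]
      rw [hstep]
      exact ih (t + 1) htT (by omega)

-- A on a terminating chain returns the terminal node (the seen-set never fires).
lemma pvALoop_term (pm : List (String × String)) (cid : String) {k : Nat}
    (hterm : pvStep pm (pvWalk pm cid k) = "") :
    ∀ fuel m (seen : PySem.Set String), m ≤ k → k < m + fuel →
    (∀ t, m ≤ t → t < k → pvStep pm (pvWalk pm cid t) ≠ "") →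
    (∀ i, m ≤ i → i ≤ k → pvWalk pm cid i ∉ seen) →
    pvALoop pm cid fuel seen (pvWalk pm cid m) = pvWalk pm cid k := by
  intro fuel
  induction fuel with
  | zero => intro m seen hmk hk _ _; omega
  | succ fuel ih =>
    intro m seen hmk hfk hne hseen
    have hmem' : pvWalk pm cid m ∉ seen := hseen m le_rfl hmk
    by_cases hs : pvStep pm (pvWalk pm cid m) = ""
    · have hmk' : m = k := by
        by_contra hne'
        exact hne m le_rfl (by omega) hs
      subst hmk'
      simp [pvALoop, hmem', hs]
    · have hmlt : m < k := by
        rcases Nat.lt_or_ge m k with h | h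
        · exact h
        · have : m = k := by omega
          exact absurd (this ▸ hterm) hs
      have hstep : pvALoop pm cid (fuel + 1) seen (pvWalk pm cid m)
          = pvALoop pm cid fuel (PySem.Set.add seen (pvWalk pm cid m)) (pvWalk pm cid (m + 1)) := by
        simp [pvALoop, hmem', hs, pvWalk]
      rw [hstep]
      apply ih (m + 1) _ (by omega) (by omega) (fun t ht1 ht2 => hne t (by omega) ht2)
      intro i hi1 hi2 hmem
      rcases (PySem.Set.mem_add _ _ _).1 hmem with h | h
      · exact hseen i (by omega) hi2 h
      · exact pvWalk_ne pm cid hne hterm (le_refl m) (by omega) hi2 h.symm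

-- A returns cid when the chain revisits a node (or a node already seen) before terminating.
lemma pvALoop_cyc (pm : List (String × String)) (cid : String) :
    ∀ fuel m (seen : PySem.Set String),
    (∃ j, m ≤ j ∧ j < m + fuel ∧
      (∀ t, m ≤ t → t < j → pvStep pm (pvWalk pm cid t) ≠ "") ∧
      (pvWalk pm cid j ∈ seen ∨ ∃ i, m ≤ i ∧ i < j ∧ pvWalk pm cid i = pvWalk pm cid j)) →
    pvALoop pm cid fuel seen (pvWalk pm cid m) = cid := by
  intro fuel
  induction fuel with
  | zero => rintro m seen ⟨j, h1, h2, _⟩; omega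
  | succ fuel ih =>
    rintro m seen ⟨j, hmj, hjf, hne, hdup⟩
    by_cases hcon : pvWalk pm cid m ∈ seen
    · simp [pvALoop, hcon]
    · have hmem : pvWalk pm cid m ∉ seen := hcon
      have hjm : m < j := by
        rcases Nat.lt_or_ge m j with h | h
        · exact h
        · have hej : j = m := by omega
          subst hej
          rcases hdup with h | ⟨i, hi1, hi2, _⟩
          · exact absurd h hmem
          · omega
      have hs : pvStep pm (pvWalk pm cid m) ≠ "" := hne m le_rfl hjm
      have hstep : pvALoop pm cid (fuel + 1) seen (pvWalk pm cid m)
          = pvALoop pm cid fuel (PySem.Set.add seen (pvWalk pm cid m)) (pvWalk pm cid (m + 1)) := by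
        simp [pvALoop, hmem, hs, pvWalk]
      rw [hstep]
      apply ih (m + 1)
      refine ⟨j, by omega, by omega, fun t ht1 ht2 => hne t (by omega) ht2, ?_⟩
      rcases hdup with h | ⟨i, hi1, hi2, hieq⟩
      · exact Or.inl ((PySem.Set.mem_add _ _ _).2 (Or.inl h))
      · rcases Nat.eq_or_lt_of_le hi1 with h | h
        · exact Or.inl ((PySem.Set.mem_add _ _ _).2 (Or.inr (h ▸ hieq).symm))
        · exact Or.inr ⟨i, by omega, hi2, hieq⟩

-- Pigeonhole: if no step within length+1 terminates, the walk repeats a node by index length.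
lemma pvWalk_pigeonhole (pm : List (String × String)) (cid : String)
    (h : ∀ t, t < pm.length + 1 → pvStep pm (pvWalk pm cid t) ≠ "") :
    ∃ i j, i < j ∧ j ≤ pm.length ∧ pvWalk pm cid i = pvWalk pm cid j := by
  by_contra hcon
  push Not at hcon
  have hinj : ∀ i ∈ List.range (pm.length + 1), ∀ j ∈ List.range (pm.length + 1),
      pvWalk pm cid i = pvWalk pm cid j → i = j := by
    intro i hi j hj hij
    simp only [List.mem_range] at hi hj
    rcases Nat.lt_trichotomy i j with h' | h' | h'
    · exact absurd hij (hcon i j h' (by omega))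
    · exact h'
    · exact absurd hij.symm (hcon j i h' (by omega))
  have hnd : ((List.range (pm.length + 1)).map (pvWalk pm cid)).Nodup :=
    (List.nodup_range).map_on hinj
  have hsub : ∀ x ∈ (List.range (pm.length + 1)).map (pvWalk pm cid),
      x ∈ pm.map Prod.fst := by
    intro x hx
    rcases List.mem_map.1 hx with ⟨t, ht, rfl⟩
    simp only [List.mem_range] at ht
    have hne := h t (by omega)
    have hget : (PySem.Dict.mk pm).get? (pvWalk pm cid t) ≠ none := by
      intro hnone
      apply hne
      unfold pvStep
      rw [PySem.Dict.getD_eq_get?_getD, hnone]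
      rfl
    have hk : pvWalk pm cid t ∈ (PySem.Dict.mk pm).keys := by
      by_contra hk
      exact hget ((PySem.Dict.get?_eq_none_iff_not_mem_keys _ _).2 hk)
    simpa [PySem.Dict.keys] using hk
  have hlen : ((List.range (pm.length + 1)).map (pvWalk pm cid)).length
      ≤ (pm.map Prod.fst).length := by
    have h1 := List.toFinset_card_of_nodup hnd
    have h2 : ((List.range (pm.length + 1)).map (pvWalk pm cid)).toFinset
        ⊆ (pm.map Prod.fst).toFinset := by
      intro x hx
      exact List.mem_toFinset.2 (hsub x (List.mem_toFinset.1 hx))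
    calc ((List.range (pm.length + 1)).map (pvWalk pm cid)).length
        = ((List.range (pm.length + 1)).map (pvWalk pm cid)).toFinset.card := h1.symm
      _ ≤ (pm.map Prod.fst).toFinset.card := Finset.card_le_card h2
      _ ≤ (pm.map Prod.fst).length := (pm.map Prod.fst).toFinset_card_le
  simp at hlen

-- ===== VERDICT (by name: the statement is the Claim_ definition above) =====
theorem compute_root_py_spec : Claim_equal_compute_root_py := by
  intro pm cid _
  unfold Spec_compute_root_py compute_root_py compute_root_py_alt
  by_cases hterm : ∃ k, pvStep pm (pvWalk pm cid k) = ""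
  · -- terminating chain: take the least terminating index k; it is ≤ length
    classical
    have hk := Nat.find_spec hterm
    set k := Nat.find hterm with hkdef
    have hmin : ∀ t, t < k → pvStep pm (pvWalk pm cid t) ≠ "" := by
      intro t ht hs
      exact (Nat.find_min hterm ht) hs
    have hkle : k ≤ pm.length := by
      by_contra hgt
      rcases pvWalk_pigeonhole pm cid (fun t ht => hmin t (by omega)) with ⟨i, j, hij, hjL, heq⟩
      exact pvWalk_ne pm cid (fun t _ ht => hmin t ht) hk (Nat.zero_le i) hij (by omega) heq
    -- A returns walk k
    have hA : pvALoop pm cid (pm.length + 2) PySem.Set.empty (pvWalk pm cid 0)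
        = pvWalk pm cid k := by
      apply pvALoop_term pm cid hk (pm.length + 2) 0 PySem.Set.empty (by omega) (by omega)
      · exact fun t _ ht => hmin t ht
      · intro i _ _ hmem; simp [PySem.Set.empty] at hmem
    -- B: Floyd breaks at some walk t0 with t0 ≤ k, then the tail walk reaches walk k
    rcases pvFloydLoop_term pm cid hk hmin
        (pm.length * pm.length + pm.length + 1) 0 (by omega) (by omega) with ⟨t0, ht0, hfl⟩
    have hfl' : pvFloydLoop pm (pm.length * pm.length + pm.length + 1) cid cid
        = some (pvWalk pm cid t0) := by simpa [pvWalk] using hfl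
    have htail : pvTail pm (pm.length + 1) (pvWalk pm cid t0) = pvWalk pm cid k := by
      apply pvTail_term pm cid (pm.length + 1) t0 ht0 (by omega) hk
      exact fun t _ ht => hmin t ht
    rw [hfl']
    exact (show pvALoop pm cid (pm.length + 2) PySem.Set.empty cid = pvWalk pm cid k from hA).trans htail.symm
  · -- no terminal node at all: both sides return cid
    push Not at hterm
    have hall : ∀ t, pvStep pm (pvWalk pm cid t) ≠ "" := hterm
    rcases pvWalk_pigeonhole pm cid (fun t _ => hall t) with ⟨i, j, hij, hjL, heq⟩
    -- the pointers meet at T = (j-i)*(i+1) ≤ length^2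
    have hper : ∀ c m, i ≤ m → pvWalk pm cid (m + c * (j - i)) = pvWalk pm cid m :=
      pvWalk_period pm cid (by rw [heq]; congr 1; omega)
    set T : Nat := (j - i) * (i + 1) with hT
    have hTge : i + 1 ≤ T := Nat.le_mul_of_pos_left _ (by omega)
    have hTmeet : pvWalk pm cid T = pvWalk pm cid (2 * T) := by
      have := hper (i + 1) T (by omega)
      have e : T + (i + 1) * (j - i) = 2 * T := by rw [hT]; ring
      rw [e] at this
      exact this.symm
    have hTle : T ≤ pm.length * pm.length := by
      have h1 : j - i ≤ pm.length := by omega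
      have h2 : i + 1 ≤ pm.length := by omega
      calc T ≤ pm.length * (i + 1) := Nat.mul_le_mul_right _ h1
        _ ≤ pm.length * pm.length := Nat.mul_le_mul_left _ h2
    have hB : pvFloydLoop pm (pm.length * pm.length + pm.length + 1) cid cid = none := by
      have := pvFloydLoop_cyc pm cid hTmeet hall
        (pm.length * pm.length + pm.length + 1) 0 (by omega) (by omega)
      simpa [pvWalk] using this
    have hA : pvALoop pm cid (pm.length + 2) PySem.Set.empty (pvWalk pm cid 0) = cid := by
      apply pvALoop_cyc pm cid (pm.length + 2) 0 PySem.Set.empty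
      exact ⟨j, by omega, by omega, fun t _ ht => hall t,
        Or.inr ⟨i, by omega, hij, heq⟩⟩
    rw [hB]
    exact hA
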